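-- pv_equiv track=rewrite | github.com/heejung-gjt/TIL | 2024/Algorithms/Programmers/LV0/개미군단.py | solution
-- ===== SOURCE A (Python) =====
-- def solution(hp):
--     li = [5, 3, 1]
--     answer = 0
--     index = 0
--     while True:
--         cnt = int(hp // li[index])
--         answer += cnt
--         hp -= (cnt * li[index])
--
--         if hp == 0:
--             break
--
--         index += 1
--
--     return answer
-- ===== SOURCE B (Python) =====
-- def solution(hp):
--     # Greedy over damages 5,3,1 reduces to: hp//5 full generals plus a fixed,
--     # precomputed ant count for each residue class of hp mod 5.
--     return hp // 5 + (0, 1, 2, 1, 2)[hp % 5]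
-- ===== Notes on version B (the rewrite author's own statement) =====
-- stated objective: simpler
-- what changed: Replaced A's iterative greedy loop (walking a divisor list with a break sentinel and mutating hp) by a single arithmetic expression: one division hp//5 plus a precomputed 5-entry residue table indexed by hp % 5 -- no loop, no staged remainder reductions.
import Mathlib
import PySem

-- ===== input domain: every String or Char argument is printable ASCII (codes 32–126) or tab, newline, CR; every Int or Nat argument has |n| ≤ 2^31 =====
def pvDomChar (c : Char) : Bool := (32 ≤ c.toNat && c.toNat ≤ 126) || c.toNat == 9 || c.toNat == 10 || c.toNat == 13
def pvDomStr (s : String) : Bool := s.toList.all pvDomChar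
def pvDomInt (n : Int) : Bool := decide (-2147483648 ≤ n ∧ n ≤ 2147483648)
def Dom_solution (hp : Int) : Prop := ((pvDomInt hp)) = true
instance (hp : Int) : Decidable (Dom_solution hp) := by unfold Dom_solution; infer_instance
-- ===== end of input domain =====

-- B replaces A's iterative greedy loop by one division plus a 5-entry residue table (simpler).

-- ===== PORT A =====
-- literal transliteration of A's `while True` loop; fuel 3 makes it total (the loop
-- always breaks within three iterations: the last divisor is 1, so hp reaches 0)
def solutionLoop (fuel : Nat) (li : List Int) (hp answer index : Int) : Int :=
  match fuel with
  | 0 => answer            -- unreachable: fuel guard only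
  | fuel + 1 =>
    match PySem.List.pyGet? li index with
    | none => answer       -- unreachable: Python would raise IndexError here, never hit
    | some d =>
      let cnt := PySem.Int.floordiv hp d
      let answer := answer + cnt
      let hp := hp - cnt * d
      if hp = 0 then answer
      else solutionLoop fuel li hp answer (index + 1)

def solution (hp : Int) : Int :=
  solutionLoop 3 [5, 3, 1] hp 0 0

-- ===== PORT B =====
-- the tuple index hp % 5 is always in range 0..4 (Python mod of positive divisor), so getD 0 is never taken
def solution_alt (hp : Int) : Int :=
  PySem.Int.floordiv hp 5 +
    (PySem.List.pyGet? [0, 1, 2, 1, 2] (PySem.Int.mod hp 5)).getD 0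

-- ===== PRECONDITION & SPEC =====
def Spec_solution (hp : Int) (out : Int) : Prop := out = solution_alt hp
instance (hp : Int) (out : Int) : Decidable (Spec_solution hp out) := by unfold Spec_solution; infer_instance

-- ===== CLAIM =====
def Claim_equal_solution : Prop := ∀ (hp : Int), Dom_solution hp → Spec_solution hp (solution hp)

-- ===== LEMMAS AND PROOFS =====

-- ===== VERDICT =====
theorem solution_spec : Claim_equal_solution := by
  intro hp _
  unfold Spec_solution solution solution_alt
  have h5 : PySem.Int.floordiv hp 5 = hp / 5 := PySem.Int.floordiv_eq_ediv_of_pos (by norm_num)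
  have hm5 : PySem.Int.mod hp 5 = hp % 5 := PySem.Int.mod_eq_emod_of_pos (by norm_num)
  have hr : hp % 5 = 0 ∨ hp % 5 = 1 ∨ hp % 5 = 2 ∨ hp % 5 = 3 ∨ hp % 5 = 4 := by omega
  norm_num [solutionLoop, PySem.List.pyGet?, PySem.List.pyIdx?, PySem.Int.floordiv_eq_ediv_of_pos,
    PySem.Int.mod_eq_emod_of_pos, h5, hm5]
  rcases hr with h | h | h | h | h <;>
    simp [h] <;> split_ifs <;> omega
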